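-- pv_equiv track=rewrite | github.com/RetoHe/university | 1.semester/softwareengineering/zustandsautomat_example.py | automata1
-- ===== SOURCE A (Python) =====
-- def automata1(input_string):
--     state = 0
--
--     for  char in input_string:
--         if state == 0 and char == "a":
--             state = 1
--         elif state == 1 and char == "c":
--             state = 1
--         elif state ==  1 and char == "b":
--             state = 2
--         else:
--             state = 3
--
--     return state == 2
-- ===== SOURCE B (Python) =====
-- def automata1(input_string):
--     chars = list(input_string)
--     if len(chars) < 2:
--         return False
--     return chars[0] == "a" and chars[-1] == "b" and all(c == "c" for c in chars[1:-1])
-- ===== Notes on version B (the rewrite author's own statement) =====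
-- stated objective: simpler
-- what changed: Replaces the accumulating DFA-state loop by direct structural checks (length guard, first and last character, and an all() scan of the middle), moving the per-character work out of an explicit Python loop.
import Mathlib
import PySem

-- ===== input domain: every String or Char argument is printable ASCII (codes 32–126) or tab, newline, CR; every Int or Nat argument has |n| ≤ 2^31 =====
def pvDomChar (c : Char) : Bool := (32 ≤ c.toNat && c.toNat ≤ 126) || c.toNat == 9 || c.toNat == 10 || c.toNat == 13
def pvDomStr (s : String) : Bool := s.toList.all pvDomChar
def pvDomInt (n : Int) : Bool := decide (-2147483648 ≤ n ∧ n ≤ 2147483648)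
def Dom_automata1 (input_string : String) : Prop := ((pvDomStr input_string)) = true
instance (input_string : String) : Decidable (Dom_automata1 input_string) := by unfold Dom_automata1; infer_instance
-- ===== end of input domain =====

-- B replaces A's accumulating DFA-state loop by direct structural checks (first char, last char, middle scan); same O(n) cost, simpler.

-- ===== PORT A =====
def pvStep (state : Int) (char : Char) : Int :=
  if state == 0 && char == 'a' then 1
  else if state == 1 && char == 'c' then 1
  else if state == 1 && char == 'b' then 2
  else 3

def automata1 (input_string : String) : Bool :=
  (input_string.toList.foldl pvStep 0) == 2

-- ===== PORT B =====
def automata1_alt (input_string : String) : Bool :=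
  let chars := input_string.toList
  if chars.length < 2 then false
  else (PySem.List.pyGet? chars 0 == some 'a')
    && (PySem.List.pyGet? chars (-1) == some 'b')
    && (PySem.List.slice chars (some 1) (some (-1))).all (fun c => c == 'c')

-- ===== PRECONDITION & SPEC =====
def Spec_automata1 (input_string : String) (out : Bool) : Prop := out = automata1_alt input_string
instance (input_string : String) (out : Bool) : Decidable (Spec_automata1 input_string out) := by unfold Spec_automata1; infer_instance

-- ===== CLAIM (what is proved, stated in full; the proofs are below) =====
def Claim_equal_automata1 : Prop := ∀ (input_string : String), Dom_automata1 input_string → Spec_automata1 input_string (automata1 input_string)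

-- ===== LEMMAS AND PROOFS =====

lemma pvStep_1c : pvStep 1 'c' = 1 := by decide
lemma pvStep_1b : pvStep 1 'b' = 2 := by decide
lemma pvStep_0a : pvStep 0 'a' = 1 := by decide
lemma pvStep_1x (c : Char) (hc : c ≠ 'c') (hb : c ≠ 'b') : pvStep 1 c = 3 := by
  simp [pvStep, hc, hb]
lemma pvStep_0x (a : Char) (ha : a ≠ 'a') : pvStep 0 a = 3 := by
  simp [pvStep, ha]
lemma pvStep_3 (c : Char) : pvStep 3 c = 3 := by simp [pvStep]

lemma pvStep_dead (l : List Char) : l.foldl pvStep 3 = 3 := by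
  induction l with
  | nil => rfl
  | cons c t ih => simpa [pvStep_3] using ih

lemma pvStep_acc (c : Char) (t : List Char) : ((c :: t).foldl pvStep 2) = 3 := by
  have h2 : pvStep 2 c = 3 := by simp [pvStep]
  simp [h2, pvStep_dead]

lemma pvStep_one (l : List Char) :
    (l.foldl pvStep 1 == 2) = ((l.getLast? == some 'b') && l.dropLast.all (fun c => c == 'c')) := by
  induction l with
  | nil => rfl
  | cons c t ih =>
    cases t with
    | nil =>
      by_cases hb : c = 'b'
      · subst hb; decide
      · by_cases hc : c = 'c'
        · subst hc; decide
        · simp [pvStep_1x c hc hb, hb]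
    | cons h t' =>
      by_cases hc : c = 'c'
      · subst hc
        rw [show ((('c' :: h :: t').foldl pvStep 1)) = ((h :: t').foldl pvStep (pvStep 1 'c')) from rfl,
          pvStep_1c, List.getLast?_cons_cons, List.dropLast_cons₂, List.all_cons]
        rw [ih]
        simp
      · by_cases hb : c = 'b'
        · subst hb
          rw [show ((('b' :: h :: t').foldl pvStep 1)) = ((h :: t').foldl pvStep (pvStep 1 'b')) from rfl,
            pvStep_1b, pvStep_acc, List.getLast?_cons_cons, List.dropLast_cons₂, List.all_cons]
          simp
        · rw [show (((c :: h :: t').foldl pvStep 1)) = ((h :: t').foldl pvStep (pvStep 1 c)) from rfl,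
            pvStep_1x c hc hb, pvStep_dead, List.getLast?_cons_cons, List.dropLast_cons₂,
            List.all_cons]
          simp [hc]

theorem automata1_spec : Claim_equal_automata1 := by
  intro s _
  unfold Spec_automata1 automata1 automata1_alt
  cases hl : s.toList with
  | nil => simp
  | cons a t =>
    cases t with
    | nil =>
      by_cases ha : a = 'a' <;> simp [pvStep, ha]
    | cons h t' =>
      by_cases ha : a = 'a'
      · subst ha
        have hget0 : PySem.List.pyGet? ('a' :: h :: t') 0 = some 'a' :=
          PySem.List.pyGet?_zero_cons _ _
        have hgetl : PySem.List.pyGet? ('a' :: h :: t') (-1) = ('a' :: h :: t').getLast? :=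
          PySem.List.pyGet?_neg_one _
        have hslice : PySem.List.slice ('a' :: h :: t') (some 1) (some (-1))
            = (h :: t').dropLast := by
          simp only [PySem.List.slice, PySem.List.clampIdx, List.dropLast_eq_take]
          split_ifs <;> simp_all <;> omega
        have hloop : (('a' :: h :: t').foldl pvStep 0) = ((h :: t').foldl pvStep 1) := by
          rw [show ((('a' :: h :: t').foldl pvStep 0)) = ((h :: t').foldl pvStep (pvStep 0 'a')) from rfl,
            pvStep_0a]
        rw [hloop]
        simp only [pvStep_one]
        simp [hget0, hgetl, hslice, List.getLast?_cons_cons]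
      · have hloop : ((a :: h :: t').foldl pvStep 0) = 3 := by
          rw [show (((a :: h :: t').foldl pvStep 0)) = ((h :: t').foldl pvStep (pvStep 0 a)) from rfl,
            pvStep_0x a ha, pvStep_dead]
        rw [hloop]
        have hg : PySem.List.pyGet? (a :: h :: t') 0 = some a :=
          PySem.List.pyGet?_zero_cons _ _
        simp [hg, ha]
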